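-- pv_equiv track=rewrite | github.com/schrodingerskatt/DSA-problems | greedy/maximum_split_of_positive_integers.py | maximumEvenSplit
-- ===== SOURCE A (Python) =====
-- from typing import List
--
-- def maximumEvenSplit(finalSum: int) -> List[int]:
--
--     if finalSum%2:
--         return []
--     else:
--         res = []
--         curSum = 0
--         i = 2
--         while curSum < finalSum:
--             curSum+=i
--             res.append(i)
--             i+=2
--         if curSum == finalSum:
--             return res
--         if curSum > finalSum:
--             val = curSum-finalSum
--             res.remove(val)
--             return res
-- ===== SOURCE B (Python) =====
-- def maximumEvenSplit(finalSum):
--     if finalSum % 2: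
--         return []
--     # binary search for the least k with k*(k+1) >= finalSum
--     lo, hi = 0, finalSum
--     while lo < hi:
--         mid = (lo + hi) // 2
--         if mid * (mid + 1) >= finalSum:
--             hi = mid
--         else:
--             lo = mid + 1
--     val = lo * (lo + 1) - finalSum
--     # answer = evens 2..2*lo with the single excess value skipped,
--     # emitted as two ranges around val (both empty pieces handle val == 0)
--     return list(range(2, val, 2)) + list(range(val + 2, 2 * lo + 1, 2))
-- ===== Notes on version B (the rewrite author's own statement) =====
-- stated objective: alternative
-- what changed: B finds the least k with k(k+1) >= finalSum by binary search on [0, finalSum] instead of A's linear greedy accumulation, and emits the answer as the concatenation of two ranges around the excess value instead of building the full list and scanning it with res.remove(val).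
import Mathlib
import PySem

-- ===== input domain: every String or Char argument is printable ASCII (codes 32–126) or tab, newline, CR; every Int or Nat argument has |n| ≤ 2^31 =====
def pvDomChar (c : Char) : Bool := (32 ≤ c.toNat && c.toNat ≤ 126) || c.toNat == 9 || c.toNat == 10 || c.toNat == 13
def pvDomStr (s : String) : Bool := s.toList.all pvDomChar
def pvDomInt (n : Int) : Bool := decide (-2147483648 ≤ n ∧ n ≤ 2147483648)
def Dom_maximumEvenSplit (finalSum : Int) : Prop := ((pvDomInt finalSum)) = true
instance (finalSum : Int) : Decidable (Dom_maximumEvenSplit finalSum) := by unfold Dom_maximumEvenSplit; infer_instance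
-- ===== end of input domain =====

-- B replaces A's linear greedy loop + res.remove(val) scan by a binary search for the least k
-- with k(k+1) ≥ finalSum followed by two range() constructions that skip the excess value.

-- ===== PORT A =====
-- termination facts for the loops, proved once so the loop bodies stay small
theorem pvDecA (fs cs i : Int) (hi : 0 < i) (h : cs < fs) :
    (fs - (cs + i)).toNat < (fs - cs).toNat := by omega
theorem pvPosA (i : Int) (hi : 0 < i) : 0 < i + 2 := by omega
theorem pvPosTwo : (0 : Int) < 2 := by decide

-- A's while loop: curSum accumulates 2+4+…, res collects the terms, i steps by 2.
-- (hi is a proof argument needed only for termination; the computation is A's.)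
def pvLoopA (finalSum curSum i : Int) (res : List Int) (hi : 0 < i) : List Int × Int :=
  if _h : curSum < finalSum then
    pvLoopA finalSum (curSum + i) (i + 2) (res ++ [i]) (pvPosA i hi)
  else (res, curSum)
termination_by (finalSum - curSum).toNat
decreasing_by exact pvDecA finalSum curSum i hi _h

-- A's code after the loop (p = (res, curSum))
def pvAfterLoopA (finalSum : Int) (p : List Int × Int) : List Int :=
  if p.2 = finalSum then p.1
  else if p.2 > finalSum then
    -- res.remove(val): raises ValueError when val ∉ res (excluded by Pre_)
    (PySem.List.remove? p.1 (p.2 - finalSum)).getD []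
  else []  -- Python falls through returning None here; unreachable (loop ends with curSum ≥ finalSum)

def maximumEvenSplit (finalSum : Int) : List Int :=
  if PySem.Int.mod finalSum 2 ≠ 0 then []
  else pvAfterLoopA finalSum (pvLoopA finalSum 0 2 [] pvPosTwo)

-- ===== PORT B =====
-- mid = (lo+hi)//2 lies in [lo, hi) when lo < hi (termination of the binary search)
theorem pvMidBounds (lo hi : Int) (h : lo < hi) :
    lo ≤ PySem.Int.floordiv (lo + hi) 2 ∧ PySem.Int.floordiv (lo + hi) 2 < hi := by
  simp [PySem.Int.floordiv, Int.fdiv_eq_ediv]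
  omega

-- B's while loop: binary search for the least k with k*(k+1) >= finalSum on [lo, hi]
def pvBinSearch (n lo hi : Int) : Int :=
  if _h : lo < hi then
    if n ≤ PySem.Int.floordiv (lo + hi) 2 * (PySem.Int.floordiv (lo + hi) 2 + 1) then
      pvBinSearch n lo (PySem.Int.floordiv (lo + hi) 2)
    else
      pvBinSearch n (PySem.Int.floordiv (lo + hi) 2 + 1) hi
  else lo
termination_by (hi - lo).toNat
decreasing_by
  · have := pvMidBounds lo hi _h; omega
  · have := pvMidBounds lo hi _h; omega

-- B's return: list(range(2, val, 2)) + list(range(val + 2, 2*lo + 1, 2)) with val = lo*(lo+1) - n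
def pvBuildB (n k : Int) : List Int :=
  PySem.List.pyRange 2 (k * (k + 1) - n) 2 ++
    PySem.List.pyRange (k * (k + 1) - n + 2) (2 * k + 1) 2

def maximumEvenSplit_alt (finalSum : Int) : List Int :=
  if PySem.Int.mod finalSum 2 ≠ 0 then []
  else pvBuildB finalSum (pvBinSearch finalSum 0 finalSum)

-- ===== PRECONDITION & SPEC =====
-- Pre_ excludes exactly the negative even inputs, on which A's res.remove raises ValueError.
def Pre_maximumEvenSplit (finalSum : Int) : Prop :=
  PySem.Int.mod finalSum 2 ≠ 0 ∨ 0 ≤ finalSum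
instance (finalSum : Int) : Decidable (Pre_maximumEvenSplit finalSum) := by
  unfold Pre_maximumEvenSplit; infer_instance
def pvWitness_maximumEvenSplit : Int := (12)

def Spec_maximumEvenSplit (finalSum : Int) (out : List Int) : Prop := out = maximumEvenSplit_alt finalSum
instance (finalSum : Int) (out : List Int) : Decidable (Spec_maximumEvenSplit finalSum out) := by unfold Spec_maximumEvenSplit; infer_instance

-- ===== CLAIM (what is proved, stated in full; the proofs are below) =====
def Claim_equal_maximumEvenSplit : Prop := ∀ (finalSum : Int), Dom_maximumEvenSplit finalSum → Pre_maximumEvenSplit finalSum → Spec_maximumEvenSplit finalSum (maximumEvenSplit finalSum)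

-- ===== LEMMAS AND PROOFS =====

-- proof-side counter: the number of loop iterations A performs, as a linear recursion
def pvK (n k : Int) (hk : 0 ≤ k) : Int :=
  if _h : k * (k + 1) < n then pvK n (k + 1) (by omega)
  else k
termination_by (n - k * (k + 1)).toNat
decreasing_by have h2 : k * (k + 1) < (k + 1) * (k + 1 + 1) := by nlinarith
              omega

theorem pvK_ge (n k : Int) (hk : 0 ≤ k) : k ≤ pvK n k hk := by
  rw [pvK]
  split
  · have := pvK_ge n (k + 1) (by omega)
    omega
  · omega
termination_by (n - k * (k + 1)).toNat
decreasing_by have h2 : k * (k + 1) < (k + 1) * (k + 1 + 1) := by nlinarith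
              omega

theorem pvK_stop (n k : Int) (hk : 0 ≤ k) :
    n ≤ pvK n k hk * (pvK n k hk + 1) := by
  rw [pvK]
  split
  · exact pvK_stop n (k + 1) (by omega)
  · omega
termination_by (n - k * (k + 1)).toNat
decreasing_by have h2 : k * (k + 1) < (k + 1) * (k + 1 + 1) := by nlinarith
              omega

theorem pvK_prev (n k : Int) (hk : 0 ≤ k) :
    pvK n k hk = k ∨ (pvK n k hk - 1) * pvK n k hk < n := by
  rw [pvK]
  split
  · rcases pvK_prev n (k + 1) (by omega) with h | h
    · right; rw [h]; linarith
    · right; exact h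
  · left; rfl
termination_by (n - k * (k + 1)).toNat
decreasing_by have h2 : k * (k + 1) < (k + 1) * (k + 1 + 1) := by nlinarith
              omega

-- bridge: A's loop started at step t produces exactly the terms 2(t+1) … 2K and the sum
-- K(K+1), where K = pvK n t
theorem pvLoopA_eq (n : Int) : ∀ (t : Int) (ht : 0 ≤ t) (res : List Int),
    pvLoopA n (t * (t + 1)) (2 * t + 2) res (by omega) =
      (res ++ (PySem.List.pyRange (t + 1) (pvK n t ht + 1) 1).map (fun j => 2 * j),
       pvK n t ht * (pvK n t ht + 1)) := by
  intro t ht res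
  rw [pvLoopA, pvK]
  split
  · rw [show pvLoopA n (t * (t + 1) + (2 * t + 2)) (2 * t + 2 + 2) (res ++ [2 * t + 2]) (by omega)
          = pvLoopA n ((t + 1) * ((t + 1) + 1)) (2 * (t + 1) + 2) (res ++ [2 * t + 2]) (by omega)
        from by congr 1 <;> ring]
    rw [pvLoopA_eq n (t + 1) (by omega) (res ++ [2 * t + 2])]
    have hK : t + 1 ≤ pvK n (t + 1) (by omega) := pvK_ge n (t + 1) (by omega)
    rw [PySem.List.pyRange_one_cons (show t + 1 < pvK n (t + 1) (by omega) + 1 by omega)]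
    simp
    omega
  · rw [PySem.List.pyRange_one_eq_nil (by omega)]
    simp
termination_by t => (n - t * (t + 1)).toNat
decreasing_by have h2 : t * (t + 1) < (t + 1) * (t + 1 + 1) := by nlinarith
              omega

-- binary-search invariants
theorem pvBin_bounds (n lo hi : Int) (h : lo ≤ hi) :
    lo ≤ pvBinSearch n lo hi ∧ pvBinSearch n lo hi ≤ hi := by
  rw [pvBinSearch]
  split
  · split
    · have hm := pvMidBounds lo hi (by assumption)
      have := pvBin_bounds n lo (PySem.Int.floordiv (lo + hi) 2) (by omega)
      omega
    · have hm := pvMidBounds lo hi (by assumption)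
      have := pvBin_bounds n (PySem.Int.floordiv (lo + hi) 2 + 1) hi (by omega)
      omega
  · omega
termination_by (hi - lo).toNat
decreasing_by
  · have := pvMidBounds lo hi (by assumption); omega
  · have := pvMidBounds lo hi (by assumption); omega

theorem pvBin_stop (n lo hi : Int) (h : lo ≤ hi) (hhi : n ≤ hi * (hi + 1)) :
    n ≤ pvBinSearch n lo hi * (pvBinSearch n lo hi + 1) := by
  rw [pvBinSearch]
  split
  · split
    · have hm := pvMidBounds lo hi (by assumption)
      exact pvBin_stop n lo _ (by omega) (by assumption)
    · have hm := pvMidBounds lo hi (by assumption)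
      exact pvBin_stop n _ hi (by omega) hhi
  · have : lo = hi := by omega
    rw [this]; exact hhi
termination_by (hi - lo).toNat
decreasing_by
  · have := pvMidBounds lo hi (by assumption); omega
  · have := pvMidBounds lo hi (by assumption); omega

theorem pvBin_prev (n lo hi : Int) (hlo : lo = 0 ∨ (lo - 1) * lo < n) :
    pvBinSearch n lo hi = 0 ∨
      (pvBinSearch n lo hi - 1) * pvBinSearch n lo hi < n := by
  rw [pvBinSearch]
  split
  · split
    · exact pvBin_prev n lo _ hlo
    · refine pvBin_prev n _ hi (Or.inr ?_)
      have : ¬ n ≤ PySem.Int.floordiv (lo + hi) 2 * (PySem.Int.floordiv (lo + hi) 2 + 1) := by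
        assumption
      have h' : PySem.Int.floordiv (lo + hi) 2 * (PySem.Int.floordiv (lo + hi) 2 + 1) < n := by
        omega
      calc (PySem.Int.floordiv (lo + hi) 2 + 1 - 1) * (PySem.Int.floordiv (lo + hi) 2 + 1)
        = PySem.Int.floordiv (lo + hi) 2 * (PySem.Int.floordiv (lo + hi) 2 + 1) := by ring
        _ < n := h'
  · exact hlo
termination_by (hi - lo).toNat
decreasing_by
  · have := pvMidBounds lo hi (by assumption); omega
  · have := pvMidBounds lo hi (by assumption); omega

-- the least k with k(k+1) ≥ n is unique given the three characterising facts
theorem pvK_uniq (n K1 K2 : Int) (h1 : 0 ≤ K1) (h2 : 0 ≤ K2)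
    (s1 : n ≤ K1 * (K1 + 1)) (s2 : n ≤ K2 * (K2 + 1))
    (p1 : K1 = 0 ∨ (K1 - 1) * K1 < n) (p2 : K2 = 0 ∨ (K2 - 1) * K2 < n) :
    K1 = K2 := by
  by_contra hne
  rcases lt_or_gt_of_ne hne with hlt | hlt
  · have hK2 : 1 ≤ K2 := by omega
    rcases p2 with h | h
    · omega
    · nlinarith
  · have hK1 : 1 ≤ K1 := by omega
    rcases p1 with h | h
    · omega
    · nlinarith

-- step-2 range helpers
theorem pvRange2_nil (a b : Int) (h : b ≤ a) : PySem.List.pyRange a b 2 = [] := by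
  rw [PySem.List.pyRange_of_pos a b (by norm_num), if_neg (by omega)]
  simp

theorem pvRange2_cons (a b : Int) (h : a < b) :
    PySem.List.pyRange a b 2 = a :: PySem.List.pyRange (a + 2) b 2 := by
  rw [PySem.List.pyRange_of_pos a b (by norm_num),
      PySem.List.pyRange_of_pos (a + 2) b (by norm_num), if_pos h]
  have harg : ((b - a + 2 - 1) / 2).toNat
      = (if a + 2 < b then ((b - (a + 2) + 2 - 1) / 2).toNat else 0) + 1 := by
    split <;> omega
  rw [harg, List.range_succ_eq_map, List.map_cons, List.map_map]
  congr 1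
  · norm_num
  · refine List.map_congr_left fun k _ => ?_
    simp [Function.comp, Nat.succ_eq_add_one]
    ring

theorem pvSplit2 (a m b : Int) (h1 : a ≤ m) (h2 : m ≤ b) (hd : 2 ∣ m - a) :
    PySem.List.pyRange a b 2 = PySem.List.pyRange a m 2 ++ PySem.List.pyRange m b 2 := by
  by_cases ha : a < m
  · rw [pvRange2_cons a b (by omega), pvRange2_cons a m ha,
        pvSplit2 (a + 2) m b (by omega) h2 (by omega)]
    simp
  · have : a = m := by omega
    rw [this, pvRange2_nil m m (le_refl m)]
    simp
termination_by (m - a).toNat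
decreasing_by omega

-- the evens 2,4,…,2K, as A builds them and as a step-2 range
theorem pvEvensList (K : Int) (hK : 0 ≤ K) :
    (PySem.List.pyRange 1 (K + 1) 1).map (fun j => 2 * j)
      = PySem.List.pyRange 2 (2 * K + 1) 2 := by
  rw [PySem.List.pyRange_one, PySem.List.pyRange_of_pos 2 (2 * K + 1) (by norm_num),
      List.map_map]
  have harg : (if (2 : Int) < 2 * K + 1 then ((2 * K + 1 - 2 + 2 - 1) / 2).toNat else 0)
      = (K + 1 - 1).toNat := by
    split <;> omega
  rw [harg]
  refine List.map_congr_left fun k _ => ?_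
  simp [Function.comp]
  ring

-- ===== VERDICT (by name: the statement is the Claim_ definition above) =====
theorem maximumEvenSplit_spec : Claim_equal_maximumEvenSplit := by
  unfold Claim_equal_maximumEvenSplit
  intro n _ hpre
  unfold Spec_maximumEvenSplit maximumEvenSplit maximumEvenSplit_alt
  by_cases hm : PySem.Int.mod n 2 = 0
  · rw [if_neg (not_not_intro hm), if_neg (not_not_intro hm)]
    have hn : 0 ≤ n := by
      rcases hpre with h | h
      · exact absurd hm h
      · exact h
    obtain ⟨c, hc⟩ := (PySem.Int.mod_eq_zero_iff_dvd n 2).mp hm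
    -- A's loop result, via the linear counter pvK
    have hloop := pvLoopA_eq n 0 (le_refl 0) []
    have hge : (0 : Int) ≤ pvK n 0 (le_refl 0) := pvK_ge n 0 (le_refl 0)
    have hstop := pvK_stop n 0 (le_refl 0)
    have hprev := pvK_prev n 0 (le_refl 0)
    norm_num at hloop
    set K := pvK n 0 (le_refl 0) with hKdef
    -- B's binary search finds the same K
    have hb1 := pvBin_bounds n 0 n hn
    have hb2 := pvBin_stop n 0 n hn (by nlinarith)
    have hb3 := pvBin_prev n 0 n (Or.inl rfl)
    have hbK : pvBinSearch n 0 n = K := by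
      refine pvK_uniq n (pvBinSearch n 0 n) K (by omega) hge hb2 hstop hb3 ?_
      rcases hprev with h | h
      · exact Or.inl h
      · exact Or.inr h
    rw [hloop]
    simp only [pvAfterLoopA, pvBuildB]
    rw [hbK]
    by_cases heq : K * (K + 1) = n
    · rw [if_pos heq, heq, sub_self, pvRange2_nil 2 0 (by omega)]
      rw [show (0 : Int) + 2 = 2 by ring]
      simp only [List.nil_append]
      exact pvEvensList K hge
    · have hgt : n < K * (K + 1) := by omega
      rw [if_neg heq, if_pos (by omega)]
      set val := K * (K + 1) - n with hval
      have hKpos : 1 ≤ K := by nlinarith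
      have hprev' : (K - 1) * K < n := by
        rcases hprev with h | h
        · exfalso; rw [h] at hgt; omega
        · exact h
      have hval_lt : val < 2 * K := by rw [hval]; nlinarith
      obtain ⟨r, hr⟩ := Int.even_mul_succ_self K
      have hval_even : 2 ∣ val := by omega
      have hval_pos : 2 ≤ val := by omega
      rw [pvEvensList K hge]
      have hmem : val ∈ PySem.List.pyRange 2 (2 * K + 1) 2 :=
        (PySem.List.mem_pyRange_iff_of_pos (by norm_num) val).mpr ⟨by omega, by omega, by omega⟩
      rw [PySem.List.remove?_eq_some_erase _ val hmem, Option.getD_some]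
      rw [pvSplit2 2 val (2 * K + 1) (by omega) (by omega) (by omega)]
      rw [List.erase_append_right _ (fun hmem1 => by
        have := (PySem.List.mem_pyRange_iff_of_pos (by norm_num) val).mp hmem1
        omega)]
      rw [pvRange2_cons val (2 * K + 1) (by omega)]
      rw [List.erase_cons_head]
  · rw [if_pos (by simpa using hm), if_pos (by simpa using hm)]
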